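-- pv_equiv track=rewrite | github.com/Katerinatsia/PROBLEM-SET-01-ALGO | problem_9.py | count_pythagorean_quadruplets
-- ===== SOURCE A (Python) =====
-- def count_pythagorean_quadruplets(array):
--     size_n = len(array)
--     hashmap = {}
--     count = 0
--
--
--     # Hash the values of a^2 + b^2 for all possible pairs
--     for i in range(size_n):
--         for j in range(i+1, size_n):
--             sum_square = array[i]*array[i] + array[j]*array[j]
--             if sum_square in hashmap:
--                 hashmap[sum_square] = hashmap[sum_square] + 1
--             else:
--                 hashmap[sum_square] = 1
--
--
--     # Hash the values of d^2 - c^2 for all possible pairs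
--     for i in range(size_n):
--         for j in range(i+1, size_n):
--             diff_square = abs(array[i]*array[i] - array[j]*array[j])
--             if diff_square in hashmap:
--                 count = count + hashmap[diff_square]
--
--
--     # Divide the count by 2 because each quadruplet is counted twice
--     return count // 2
-- ===== SOURCE B (Python) =====
-- def count_pythagorean_quadruplets(array):
--     # Direct counting: no hash table; for every "difference" pair scan every
--     # "sum" pair and count the matches, then halve (each quadruplet counted twice).
--     n = len(array)
--     count = 0
--     for k in range(n):
--         for l in range(k + 1, n):
--             d = abs(array[k] * array[k] - array[l] * array[l])
--             for i in range(n):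
--                 for j in range(i + 1, n):
--                     if array[i] * array[i] + array[j] * array[j] == d:
--                         count += 1
--     return count // 2
-- ===== Notes on version B (the rewrite author's own statement) =====
-- stated objective: alternative
-- what changed: Replaces the hashmap phase entirely: instead of building a counter of a^2+b^2 over all pairs and looking up each |c^2-d^2|, B scans the sum-pair family directly inside the difference-pair loop and counts matches, trading the O(n^2) dict for O(n^4) direct counting with no auxiliary structure.
import Mathlib
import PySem

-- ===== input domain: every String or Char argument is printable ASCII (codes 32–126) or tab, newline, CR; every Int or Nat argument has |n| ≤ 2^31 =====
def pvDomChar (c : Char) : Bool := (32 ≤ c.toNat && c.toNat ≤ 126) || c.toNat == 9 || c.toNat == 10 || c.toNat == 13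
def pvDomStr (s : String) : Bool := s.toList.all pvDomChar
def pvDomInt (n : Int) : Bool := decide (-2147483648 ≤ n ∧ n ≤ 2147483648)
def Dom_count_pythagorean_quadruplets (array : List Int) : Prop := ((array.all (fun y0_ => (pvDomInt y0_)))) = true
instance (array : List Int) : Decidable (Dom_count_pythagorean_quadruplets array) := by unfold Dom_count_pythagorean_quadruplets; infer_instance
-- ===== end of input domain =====

-- B drops A's hashmap phase: it counts matches by scanning the sum-pair family directly
-- inside the difference-pair loop (objective: alternative algorithm, no auxiliary structure).


-- ===== PORT A =====
def count_pythagorean_quadruplets (array : List Int) : Int :=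
  let size_n : Int := PySem.List.len array
  let hashmap : PySem.Dict Int Int :=
    (PySem.List.pyRange 0 size_n 1).foldl (fun h i =>
      (PySem.List.pyRange (i + 1) size_n 1).foldl (fun h j =>
        let sum_square := PySem.List.pyGetD array i 0 * PySem.List.pyGetD array i 0 +
                          PySem.List.pyGetD array j 0 * PySem.List.pyGetD array j 0
        if h.contains sum_square then h.insert sum_square (h.getD sum_square 0 + 1)
        else h.insert sum_square 1) h) PySem.Dict.empty
  let count : Int :=
    (PySem.List.pyRange 0 size_n 1).foldl (fun c i =>
      (PySem.List.pyRange (i + 1) size_n 1).foldl (fun c j =>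
        let diff_square := |PySem.List.pyGetD array i 0 * PySem.List.pyGetD array i 0 -
                            PySem.List.pyGetD array j 0 * PySem.List.pyGetD array j 0|
        if hashmap.contains diff_square then c + hashmap.getD diff_square 0 else c) c) 0
  PySem.Int.floordiv count 2

-- ===== PORT B =====
def count_pythagorean_quadruplets_alt (array : List Int) : Int :=
  let n : Int := PySem.List.len array
  let count : Int :=
    (PySem.List.pyRange 0 n 1).foldl (fun c k =>
      (PySem.List.pyRange (k + 1) n 1).foldl (fun c l =>
        let d := |PySem.List.pyGetD array k 0 * PySem.List.pyGetD array k 0 -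
                  PySem.List.pyGetD array l 0 * PySem.List.pyGetD array l 0|
        (PySem.List.pyRange 0 n 1).foldl (fun c i =>
          (PySem.List.pyRange (i + 1) n 1).foldl (fun c j =>
            if PySem.List.pyGetD array i 0 * PySem.List.pyGetD array i 0 +
               PySem.List.pyGetD array j 0 * PySem.List.pyGetD array j 0 = d
            then c + 1 else c) c) c) c) 0
  PySem.Int.floordiv count 2

-- ===== PRECONDITION & SPEC =====
def Spec_count_pythagorean_quadruplets (array : List Int) (out : Int) : Prop := out = count_pythagorean_quadruplets_alt array
instance (array : List Int) (out : Int) : Decidable (Spec_count_pythagorean_quadruplets array out) := by unfold Spec_count_pythagorean_quadruplets; infer_instance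

-- ===== CLAIM (what is proved, stated in full; the proofs are below) =====
def Claim_equal_count_pythagorean_quadruplets : Prop := ∀ (array : List Int), Dom_count_pythagorean_quadruplets array → Spec_count_pythagorean_quadruplets array (count_pythagorean_quadruplets array)

-- ===== LEMMAS AND PROOFS =====

-- ordered index pairs (i < j) as value pairs
def pvPairs : List Int → List (Int × Int)
  | [] => []
  | x :: t => t.map (fun y => (x, y)) ++ pvPairs t

-- the i<j double index loop is a fold over pvPairs (Nat-range form)
theorem pvPairloop_nat {β : Type} (g : β → Int → Int → β) :
    ∀ (xs : List Int) (init : β),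
    (List.range xs.length).foldl (fun acc k =>
      (xs.drop (k + 1)).foldl (fun a y => g a (xs.getD k 0) y) acc) init
    = (pvPairs xs).foldl (fun acc p => g acc p.1 p.2) init := by
  intro xs
  induction xs with
  | nil => intro init; simp [pvPairs]
  | cons x t ih =>
    intro init
    rw [List.length_cons, List.range_succ_eq_map, List.foldl_cons, List.foldl_map]
    simp only [Nat.succ_eq_add_one, Nat.zero_add, List.drop_succ_cons, List.getD_cons_zero,
      List.getD_cons_succ, List.drop_zero]
    rw [ih, pvPairs]
    rw [List.foldl_append, List.foldl_map]

-- the pyRange double loop reduces to the Nat-range form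
theorem pvPairloop {β : Type} (g : β → Int → Int → β) (xs : List Int) (init : β) :
    (PySem.List.pyRange 0 (PySem.List.len xs) 1).foldl (fun acc i =>
      (PySem.List.pyRange (i + 1) (PySem.List.len xs) 1).foldl (fun acc j =>
        g acc (PySem.List.pyGetD xs i 0) (PySem.List.pyGetD xs j 0)) acc) init
    = (pvPairs xs).foldl (fun acc p => g acc p.1 p.2) init := by
  rw [PySem.List.pyRange_one]
  rw [List.foldl_map]
  have hstep : ∀ (acc : β) (k : Nat),
      (PySem.List.pyRange ((0:Int) + k + 1) (PySem.List.len xs) 1).foldl (fun a j =>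
        g a (PySem.List.pyGetD xs ((0:Int) + k) 0) (PySem.List.pyGetD xs j 0)) acc
      = (xs.drop (k + 1)).foldl (fun a y => g a (xs.getD k 0) y) acc := by
    intro acc k
    have h0 : (0:Int) + (k:Int) = (k:Int) := by ring
    rw [h0]
    have h1 : ((k:Int) + 1) = ((k + 1 : Nat) : Int) := by push_cast; ring
    rw [h1, PySem.List.foldl_pyRange_pyGetD _ _ _ _ (by positivity)]
    simp
  calc (List.range ((PySem.List.len xs - 0).toNat)).foldl (fun acc (k : Nat) =>
        (PySem.List.pyRange ((0:Int) + k + 1) (PySem.List.len xs) 1).foldl (fun a j =>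
          g a (PySem.List.pyGetD xs ((0:Int) + k) 0) (PySem.List.pyGetD xs j 0)) acc) init
      = (List.range xs.length).foldl (fun acc k =>
          (xs.drop (k + 1)).foldl (fun a y => g a (xs.getD k 0) y) acc) init := by
        have hn : (PySem.List.len xs - 0).toNat = xs.length := by simp
        rw [hn]
        exact PySem.List.foldl_congr_mem _ _ _ _ (fun acc k _ => hstep acc k)
    _ = (pvPairs xs).foldl (fun acc p => g acc p.1 p.2) init := pvPairloop_nat g xs init

-- sums of squares over all pairs
def pvSums (xs : List Int) : List Int := (pvPairs xs).map (fun p => p.1 * p.1 + p.2 * p.2)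

theorem pvHashmap_eq_counter (xs : List Int) :
    (pvPairs xs).foldl (fun h p =>
        if h.contains (p.1 * p.1 + p.2 * p.2) then
          h.insert (p.1 * p.1 + p.2 * p.2) (h.getD (p.1 * p.1 + p.2 * p.2) 0 + 1)
        else h.insert (p.1 * p.1 + p.2 * p.2) 1)
      (PySem.Dict.empty : PySem.Dict Int Int)
    = PySem.Dict.counter (pvSums xs) := by
  rw [PySem.List.foldl_congr_mem _ _
      (fun h p => h.insert (p.1 * p.1 + p.2 * p.2) (h.getD (p.1 * p.1 + p.2 * p.2) 0 + 1)) _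
      (by
        intro h p _
        by_cases hc : h.contains (p.1 * p.1 + p.2 * p.2)
        · simp [hc]
        · have h0 : h.getD (p.1 * p.1 + p.2 * p.2) 0 = 0 :=
            PySem.Dict.getD_of_not_contains h 0 (by simpa using hc)
          simp [hc, h0])]
  rw [pvSums, ← PySem.Dict.foldl_insert_getD_add_one_eq_counter, List.foldl_map]

theorem pvCount_step (xs : List Int) (c d : Int) :
    (if (PySem.Dict.counter (pvSums xs)).contains d then
        c + (PySem.Dict.counter (pvSums xs)).getD d 0 else c)
    = c + ((pvSums xs).count d : Int) := by
  by_cases hc : (PySem.Dict.counter (pvSums xs)).contains d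
  · simp [hc, PySem.Dict.getD_counter]
  · have hnm : d ∉ pvSums xs := by
      intro hm
      exact hc (by simpa [PySem.Dict.contains_counter] using hm)
    simp [hc, List.count_eq_zero.mpr hnm]

-- inner double loop of B counts the matching sum pairs
theorem pvInner_eq_count (xs : List Int) (d c : Int) :
    (pvPairs xs).foldl (fun c q =>
        if q.1 * q.1 + q.2 * q.2 = d then c + 1 else c) c
    = c + ((pvSums xs).count d : Int) := by
  rw [PySem.List.foldl_ite_add_one]
  congr 1
  rw [pvSums]
  rw [List.count_eq_countP, List.countP_map]
  congr 1

-- ===== VERDICT (by name: the statement is the Claim_ definition above) =====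
theorem count_pythagorean_quadruplets_spec : Claim_equal_count_pythagorean_quadruplets := by
  intro array _
  unfold Spec_count_pythagorean_quadruplets
  unfold count_pythagorean_quadruplets count_pythagorean_quadruplets_alt
  simp only []
  rw [pvPairloop (fun h a b =>
        let s := a * a + b * b
        if PySem.Dict.contains h s then h.insert s (h.getD s 0 + 1) else h.insert s 1)]
  rw [pvHashmap_eq_counter]
  rw [pvPairloop (fun c a b =>
        let d := |a * a - b * b|
        if (PySem.Dict.counter (pvSums array)).contains d then
          c + (PySem.Dict.counter (pvSums array)).getD d 0 else c)]
  rw [pvPairloop (fun c a b =>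
        let d := |a * a - b * b|
        (PySem.List.pyRange 0 (PySem.List.len array) 1).foldl (fun c i =>
          (PySem.List.pyRange (i + 1) (PySem.List.len array) 1).foldl (fun c j =>
            if PySem.List.pyGetD array i 0 * PySem.List.pyGetD array i 0 +
               PySem.List.pyGetD array j 0 * PySem.List.pyGetD array j 0 = d
            then c + 1 else c) c) c)]
  congr 1
  apply PySem.List.foldl_congr_mem
  intro c p _
  simp only []
  rw [pvPairloop (fun c a b =>
        if a * a + b * b = |p.1 * p.1 - p.2 * p.2| then c + 1 else c)]
  rw [pvInner_eq_count, pvCount_step]
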